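-- pv_equiv track=rewrite | github.com/kh277/BOJ | 백준/Silver/3230. 금메달， 은메달， 동메달은 누가？/금메달， 은메달， 동메달은 누가？.py | solve
-- ===== SOURCE A (Python) =====
-- def solve(N, M, first, second):
--     score = []
--     for i in range(N):
--         score.insert(first[i]-1, i+1)
--
--     score2 = []
--     score = score[:M][::-1]
--     for i in range(M):
--         score2.insert(second[i]-1, score[i])
--
--     return score2[:3]
-- ===== SOURCE B (Python) =====
-- def _insert_all(positions, values):
--     """Return the list produced by successively inserting values[i] at
--     positions[i] (list.insert index semantics: a negative position counts
--     from the end, anything still out of range goes to the nearer end).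
--
--     Instead of shifting elements on every insertion, each value is written
--     straight into its final slot: going over the insertions in reverse,
--     the i-th insertion acted on a list of i elements, and the slot it chose
--     is the corresponding one among the still-unclaimed slots.
--     """
--     k = len(positions)
--     result = [None] * k
--     free = list(range(k))
--     for i in reversed(range(k)):
--         p = positions[i]
--         if p < 0:
--             p = max(p + i, 0)
--         result[free.pop(min(p, i))] = values[i]
--     return result
--
--
-- def solve(N, M, first, second):
--     score = _insert_all([first[i] - 1 for i in range(N)], range(1, N + 1))
--     top = score[:M][::-1]
--     score2 = _insert_all([second[i] - 1 for i in range(M)], top)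
--     return score2[:3]
-- ===== Notes on version B (the rewrite author's own statement) =====
-- stated objective: alternative
-- what changed: B replaces A's sequential list insertions by a reverse pass that writes each value directly into its final slot by popping the chosen one of the still-unclaimed slots; Pre_ excludes only the inputs on which A raises IndexError (N > len(first), M > len(second), or M > max(N,0)).
import Mathlib
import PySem

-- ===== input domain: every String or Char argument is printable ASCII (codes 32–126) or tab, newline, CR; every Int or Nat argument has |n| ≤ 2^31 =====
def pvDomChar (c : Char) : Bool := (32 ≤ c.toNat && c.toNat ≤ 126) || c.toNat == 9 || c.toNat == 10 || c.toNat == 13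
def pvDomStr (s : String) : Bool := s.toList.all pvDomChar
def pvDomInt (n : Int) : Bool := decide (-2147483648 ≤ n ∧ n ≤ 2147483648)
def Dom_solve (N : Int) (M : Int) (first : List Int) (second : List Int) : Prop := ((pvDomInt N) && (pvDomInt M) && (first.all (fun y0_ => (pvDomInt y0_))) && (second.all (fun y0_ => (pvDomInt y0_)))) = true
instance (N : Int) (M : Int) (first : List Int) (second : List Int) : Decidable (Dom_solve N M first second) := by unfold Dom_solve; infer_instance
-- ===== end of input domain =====

-- B replaces A's sequential list insertions by a reverse pass that writes each value
-- directly into its final slot, popped from the list of still-unclaimed slots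
-- (objective: alternative).

-- ===== PORT A =====
def solve (N : Int) (M : Int) (first : List Int) (second : List Int) : List Int :=
  -- score = []; for i in range(N): score.insert(first[i]-1, i+1)
  let score := (PySem.List.pyRange 0 N 1).foldl
      (fun acc i => PySem.List.insert acc (PySem.List.pyGetD first i 0 - 1) (i + 1)) []
  -- score = score[:M][::-1]
  let score' := (PySem.List.slice? (PySem.List.slice score none (some M)) none none (-1)).getD []
  -- score2 = []; for i in range(M): score2.insert(second[i]-1, score[i])
  let score2 := (PySem.List.pyRange 0 M 1).foldl
      (fun acc i => PySem.List.insert acc (PySem.List.pyGetD second i 0 - 1)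
        (PySem.List.pyGetD score' i 0)) []
  -- return score2[:3]
  PySem.List.slice score2 none (some 3)

-- ===== PORT B =====
-- Source B's position adjustment: p = positions[i]; if p < 0: p = max(p + i, 0); … min(p, i)
def clampPy (p L : Int) : Int :=
  min (if p < 0 then max (p + L) 0 else p) L

-- one iteration of _insert_all's loop: result[free.pop(min(p, i))] = values[i]
-- (the popped slot is always a valid nonnegative index of result, so List.set at
-- slot.toNat is exact for result[slot] = …)
def placeStep (pos vals : List Int) (st : List Int × List Int) (i : Int) : List Int × List Int :=
  let e := clampPy (PySem.List.pyGetD pos i 0) i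
  match PySem.List.pop? st.2 e with
  | some (slot, free') => (st.1.set slot.toNat (PySem.List.pyGetD vals i 0), free')
  | none => st  -- unreachable: e is always a valid index of the free list

-- _insert_all(positions, values): k = len(positions); result = [None]*k;
-- free = list(range(k)); for i in reversed(range(k)): …
def place (pos vals : List Int) : List Int :=
  let k := pos.length
  (((PySem.List.pyRange 0 (k : Int) 1).reverse).foldl (placeStep pos vals)
      (List.replicate k 0, PySem.List.pyRange 0 (k : Int) 1)).1

def solve_alt (N : Int) (M : Int) (first : List Int) (second : List Int) : List Int :=
  let score := place ((PySem.List.pyRange 0 N 1).map (fun i => PySem.List.pyGetD first i 0 - 1))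
      (PySem.List.pyRange 1 (N + 1) 1)
  let top := (PySem.List.slice? (PySem.List.slice score none (some M)) none none (-1)).getD []
  let score2 := place ((PySem.List.pyRange 0 M 1).map (fun i => PySem.List.pyGetD second i 0 - 1))
      top
  PySem.List.slice score2 none (some 3)

-- ===== PRECONDITION & SPEC =====
-- Pre_ = exactly the inputs on which the Python A returns: first must cover indices 0..N-1,
-- second must cover 0..M-1, and M ≤ max N 0 (otherwise score[i] raises IndexError).
def Pre_solve (N : Int) (M : Int) (first : List Int) (second : List Int) : Prop :=
  N ≤ (first.length : Int) ∧ M ≤ (second.length : Int) ∧ M ≤ max N 0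
instance (N : Int) (M : Int) (first : List Int) (second : List Int) : Decidable (Pre_solve N M first second) := by unfold Pre_solve; infer_instance

def pvWitness_solve : Int × Int × List Int × List Int := (4, 3, [1, 1, 2, 2], [1, 2, 1])

def Spec_solve (N : Int) (M : Int) (first : List Int) (second : List Int) (out : List Int) : Prop := out = solve_alt N M first second
instance (N : Int) (M : Int) (first : List Int) (second : List Int) (out : List Int) : Decidable (Spec_solve N M first second out) := by unfold Spec_solve; infer_instance

-- ===== CLAIM (what is proved, stated in full; the proofs are below) =====
def Claim_equal_solve : Prop := ∀ (N : Int) (M : Int) (first : List Int) (second : List Int), Dom_solve N M first second → Pre_solve N M first second → Spec_solve N M first second (solve N M first second)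

-- ===== LEMMAS AND PROOFS =====

-- A's insertion loop shape, with position and value read by index at each step.
def aFold (pos vals : List Int) (k : Nat) : List Int :=
  (PySem.List.pyRange 0 (k : Int) 1).foldl
    (fun acc i => PySem.List.insert acc (PySem.List.pyGetD pos i 0) (PySem.List.pyGetD vals i 0)) []

-- write ws into res at the positions listed in free, in order
def writeAt (res free ws : List Int) : List Int :=
  (free.zip ws).foldl (fun r sw => r.set sw.1.toNat sw.2) res

lemma toNat_clamp_eq (n : Nat) (i : Int) :
    (if i < 0 then max (i + (n : Int)) 0 else min i (n : Int)).toNat = PySem.List.clampIdx n i := by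
  simp only [PySem.List.clampIdx]
  split_ifs <;> omega

lemma insert_eq_clamp {α : Type} (xs : List α) (i : Int) (v : α) :
    PySem.List.insert xs i v
      = xs.take (PySem.List.clampIdx xs.length i) ++ v :: xs.drop (PySem.List.clampIdx xs.length i) := by
  simp [PySem.List.insert, PySem.List.sliceIndices, toNat_clamp_eq]

lemma clampPy_eq (p : Int) (L : Nat) :
    clampPy p (L : Int) = ((PySem.List.clampIdx L p : Nat) : Int) := by
  simp only [clampPy, PySem.List.clampIdx]
  split_ifs <;> omega

lemma length_aFold (pos vals : List Int) (k : Nat) : (aFold pos vals k).length = k := by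
  induction k with
  | zero => simp [aFold, PySem.List.pyRange_one_eq_nil]
  | succ k ih =>
    have h : ((k + 1 : Nat) : Int) = (k : Int) + 1 := by push_cast; ring
    rw [aFold, h, PySem.List.pyRange_one_succ_right (by positivity), List.foldl_append]
    simp only [List.foldl_cons, List.foldl_nil]
    rw [PySem.List.length_insert]
    exact congrArg (· + 1) ih

lemma aFold_succ (pos vals : List Int) (k : Nat) :
    aFold pos vals (k + 1)
      = PySem.List.insert (aFold pos vals k) (PySem.List.pyGetD pos (k : Int) 0)
          (PySem.List.pyGetD vals (k : Int) 0) := by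
  have h : ((k + 1 : Nat) : Int) = (k : Int) + 1 := by push_cast; ring
  rw [aFold, h, PySem.List.pyRange_one_succ_right (by positivity), List.foldl_append]
  simp [aFold]

-- exchange lemma: writing an "inserted" list through free = writing v at the popped slot,
-- then the rest through the remaining free slots
lemma writeAt_insert (e : Nat) : ∀ (free L res : List Int) (v : Int)
    (hnd : free.Nodup) (hpos : ∀ x ∈ free, 0 ≤ x) (hlen : free.length = L.length + 1)
    (helt : e ≤ L.length),
    writeAt res free (L.take e ++ v :: L.drop e)
      = writeAt (res.set ((free[e]'(by omega)).toNat) v) (free.eraseIdx e) L := by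
  induction e with
  | zero =>
    intro free L res v hnd hpos hlen helt
    match free with
    | f :: fs => simp [writeAt]
  | succ e ih =>
    intro free L res v hnd hpos hlen helt
    match free, L with
    | f :: fs, x :: L' =>
      have hnd' : fs.Nodup := hnd.of_cons
      have hpos' : ∀ y ∈ fs, 0 ≤ y := fun y hy => hpos y (List.mem_cons_of_mem _ hy)
      have hlen' : fs.length = L'.length + 1 := by
        simpa using hlen
      have helt' : e ≤ L'.length := by simpa using helt
      have hfe : e < fs.length := by omega
      -- both sides peel the head write, then set_comm
      have hne : f.toNat ≠ (fs[e]'hfe).toNat := by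
        have h1 : f ∉ fs := (List.nodup_cons.mp hnd).1
        have h2 : fs[e]'hfe ∈ fs := List.getElem_mem hfe
        have h3 : f ≠ fs[e]'hfe := fun h => h1 (h ▸ h2)
        have h4 : 0 ≤ f := hpos f (List.mem_cons_self)
        have h5 : 0 ≤ fs[e]'hfe := hpos' _ h2
        omega
      calc writeAt res (f :: fs) ((x :: L').take (e+1) ++ v :: (x :: L').drop (e+1))
          = writeAt (res.set f.toNat x) fs (L'.take e ++ v :: L'.drop e) := by
            simp [writeAt]
        _ = writeAt ((res.set f.toNat x).set ((fs[e]'hfe).toNat) v) (fs.eraseIdx e) L' :=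
            ih fs L' (res.set f.toNat x) v hnd' hpos' hlen' helt'
        _ = writeAt ((res.set ((fs[e]'hfe).toNat) v).set f.toNat x) (fs.eraseIdx e) L' := by
            rw [List.set_comm _ _ hne]
        _ = writeAt (res.set (((f :: fs)[e+1]'(by omega)).toNat) v) ((f :: fs).eraseIdx (e+1)) (x :: L') := by
            simp [writeAt]

-- the reverse free-slot loop computes aFold scattered through the free slots
lemma place_loop (k : Nat) : ∀ (pos vals res free : List Int)
    (hlen : free.length = k) (hpos : ∀ x ∈ free, 0 ≤ x) (hnd : free.Nodup),
    ((PySem.List.pyRange 0 (k : Int) 1).foldr (fun i st => placeStep pos vals st i) (res, free)).1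
      = writeAt res free (aFold pos vals k) := by
  induction k with
  | zero =>
    intro pos vals res free hlen hpos hnd
    simp [PySem.List.pyRange_one_eq_nil le_rfl, aFold, writeAt]
  | succ k ih =>
    intro pos vals res free hlen hpos hnd
    have hcast : ((k + 1 : Nat) : Int) = (k : Int) + 1 := by push_cast; ring
    rw [hcast, PySem.List.pyRange_one_succ_right (by positivity), List.foldr_append]
    simp only [List.foldr_cons, List.foldr_nil]
    -- the first processed index is i = k, with the full free list (length k+1)
    have hc : PySem.List.clampIdx k (PySem.List.pyGetD pos (k : Int) 0) < free.length := by
      have := PySem.List.clampIdx_le k (PySem.List.pyGetD pos (k : Int) 0)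
      omega
    have hstep : placeStep pos vals (res, free) (k : Int)
        = (res.set ((free[PySem.List.clampIdx k (PySem.List.pyGetD pos (k : Int) 0)]'hc).toNat)
             (PySem.List.pyGetD vals (k : Int) 0),
           free.eraseIdx (PySem.List.clampIdx k (PySem.List.pyGetD pos (k : Int) 0))) := by
      have hp := PySem.List.pop?_natCast free _ hc
      unfold placeStep
      dsimp only
      rw [clampPy_eq, hp]
    have hlen' : (free.eraseIdx (PySem.List.clampIdx k (PySem.List.pyGetD pos (k : Int) 0))).length
        = k := by
      rw [List.length_eraseIdx_of_lt hc]; omega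
    have hpos' : ∀ x ∈ free.eraseIdx (PySem.List.clampIdx k (PySem.List.pyGetD pos (k : Int) 0)),
        0 ≤ x := fun x hx => hpos x (List.eraseIdx_subset hx)
    have hnd' : (free.eraseIdx (PySem.List.clampIdx k (PySem.List.pyGetD pos (k : Int) 0))).Nodup :=
      hnd.eraseIdx _
    rw [hstep, ih pos vals _ _ hlen' hpos' hnd', aFold_succ, insert_eq_clamp, length_aFold]
    exact (writeAt_insert _ free (aFold pos vals k) res _ hnd hpos
      (by rw [length_aFold]; omega)
      (by rw [length_aFold]; exact PySem.List.clampIdx_le _ _)).symm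

-- writing a full-length list through the increasing run of all its slots reproduces it
lemma writeAt_range (L : List Int) : ∀ (res1 res2 : List Int), res2.length = L.length →
    writeAt (res1 ++ res2)
      (PySem.List.pyRange (res1.length : Int) ((res1.length : Int) + (L.length : Int)) 1) L
      = res1 ++ L := by
  induction L with
  | nil =>
    intro res1 res2 h
    have h2 : res2 = [] := List.length_eq_zero_iff.mp h
    simp [h2, writeAt, PySem.List.pyRange_one_eq_nil le_rfl]
  | cons x L' ih =>
    intro res1 res2 h
    match res2, h with
    | y :: res2', h =>
      have h' : res2'.length = L'.length := by simpa using h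
      have hlt : (res1.length : Int) < (res1.length : Int) + ((x :: L').length : Int) := by
        simp only [List.length_cons]; push_cast; omega
      rw [PySem.List.pyRange_one_cons hlt]
      have hset : (res1 ++ y :: res2').set ((res1.length : Int)).toNat x = res1 ++ x :: res2' := by
        rw [Int.toNat_natCast, List.set_append_right _ _ (le_refl _)]
        simp
      have hrange : PySem.List.pyRange ((res1.length : Int) + 1)
            ((res1.length : Int) + ((x :: L').length : Int)) 1
          = PySem.List.pyRange (((res1 ++ [x]).length : Int))
            (((res1 ++ [x]).length : Int) + (L'.length : Int)) 1 := by
        have e1 : (((res1 ++ [x]).length : Nat) : Int) = (res1.length : Int) + 1 := by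
          push_cast [List.length_append, List.length_singleton]; ring
        rw [e1]
        congr 1
        simp only [List.length_cons]
        omega
      calc writeAt (res1 ++ y :: res2')
            ((res1.length : Int) :: PySem.List.pyRange ((res1.length : Int) + 1)
              ((res1.length : Int) + ((x :: L').length : Int)) 1) (x :: L')
          = writeAt (res1 ++ x :: res2')
              (PySem.List.pyRange ((res1.length : Int) + 1)
                ((res1.length : Int) + ((x :: L').length : Int)) 1) L' := by
            simp only [writeAt, List.zip_cons_cons, List.foldl_cons, hset]
        _ = writeAt ((res1 ++ [x]) ++ res2')
              (PySem.List.pyRange (((res1 ++ [x]).length : Int))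
                (((res1 ++ [x]).length : Int) + (L'.length : Int)) 1) L' := by
            rw [hrange]; simp
        _ = (res1 ++ [x]) ++ L' := ih (res1 ++ [x]) res2' h'
        _ = res1 ++ x :: L' := by simp

lemma place_eq (pos vals : List Int) : place pos vals = aFold pos vals pos.length := by
  show (((PySem.List.pyRange 0 (pos.length : Int) 1).reverse).foldl (placeStep pos vals)
      (List.replicate pos.length 0, PySem.List.pyRange 0 (pos.length : Int) 1)).1
    = aFold pos vals pos.length
  rw [List.foldl_reverse]
  have hlen : (PySem.List.pyRange 0 (pos.length : Int) 1).length = pos.length := by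
    simp [PySem.List.length_pyRange_one]
  have hpos : ∀ x ∈ PySem.List.pyRange 0 (pos.length : Int) 1, 0 ≤ x := by
    intro x hx
    exact (PySem.List.mem_pyRange_one.mp hx).1
  rw [place_loop pos.length pos vals _ _ hlen hpos (PySem.List.nodup_pyRange_one 0 _)]
  have := writeAt_range (aFold pos vals pos.length) [] (List.replicate pos.length 0)
    (by simp [length_aFold])
  simpa [length_aFold] using this

lemma pyRange_max (a : Int) : PySem.List.pyRange 0 a 1 = PySem.List.pyRange 0 (max a 0) 1 := by
  rw [PySem.List.pyRange_one, PySem.List.pyRange_one]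
  have h : (a - 0).toNat = (max a 0 - 0).toNat := by omega
  rw [h]

-- one stage of A (insert loop reading positions rd · - 1 and values vd ·) = the same stage of B
lemma stage_eq (a : Int) (rd vd : Int → Int) (vals : List Int)
    (hv : ∀ i, 0 ≤ i → i < a → PySem.List.pyGetD vals i 0 = vd i) :
    (PySem.List.pyRange 0 a 1).foldl
        (fun acc i => PySem.List.insert acc (rd i - 1) (vd i)) []
      = place ((PySem.List.pyRange 0 a 1).map (fun i => rd i - 1)) vals := by
  rw [place_eq]
  have hlen : ((PySem.List.pyRange 0 a 1).map (fun i => rd i - 1)).length = a.toNat := by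
    simp [PySem.List.length_pyRange_one]
  rw [hlen, aFold]
  have hcast : ((a.toNat : Nat) : Int) = max a 0 := by omega
  rw [hcast, ← pyRange_max a]
  apply PySem.List.foldl_congr_mem
  intro acc x hx
  have hx' := PySem.List.mem_pyRange_one.mp hx
  rw [pyRange_max a, PySem.List.pyGetD_map_pyRange_of_nonneg _ _ _ _ hx'.1 (by omega),
    hv x hx'.1 hx'.2]

lemma vals1_read (n : Int) :
    ∀ i, 0 ≤ i → i < n → PySem.List.pyGetD (PySem.List.pyRange 1 (n + 1) 1) i 0 = i + 1 := by
  intro i h0 hi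
  have h : PySem.List.pyRange 1 (n + 1) 1 = (PySem.List.pyRange 0 n 1).map (fun j => j + 1) := by
    rw [PySem.List.pyRange_one, PySem.List.pyRange_one, List.map_map]
    have h2 : (n + 1 - 1).toNat = (n - 0).toNat := by omega
    rw [h2]
    refine List.map_congr_left fun y _ => ?_
    simp [add_comm]
  rw [h, pyRange_max n, PySem.List.pyGetD_map_pyRange_of_nonneg _ _ _ _ h0 (by omega)]

lemma solve_eq (N M : Int) (first second : List Int) :
    solve N M first second = solve_alt N M first second := by
  simp only [solve, solve_alt]
  have h1 := stage_eq N (fun i => PySem.List.pyGetD first i 0) (fun i => i + 1)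
    (PySem.List.pyRange 1 (N + 1) 1)
    (fun i h0 hi => vals1_read N i h0 hi)
  simp only [] at h1
  rw [h1]
  have h2 := stage_eq M (fun i => PySem.List.pyGetD second i 0)
    (fun i => PySem.List.pyGetD
      ((PySem.List.slice? (PySem.List.slice
        (place ((PySem.List.pyRange 0 N 1).map
          (fun i => PySem.List.pyGetD first i 0 - 1)) (PySem.List.pyRange 1 (N + 1) 1))
        none (some M)) none none (-1)).getD []) i 0)
    ((PySem.List.slice? (PySem.List.slice
        (place ((PySem.List.pyRange 0 N 1).map
          (fun i => PySem.List.pyGetD first i 0 - 1)) (PySem.List.pyRange 1 (N + 1) 1))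
        none (some M)) none none (-1)).getD [])
    (fun i _ _ => rfl)
  simp only [] at h2
  rw [h2]

-- ===== VERDICT (by name: the statement is the Claim_ definition above) =====
theorem solve_spec : Claim_equal_solve := by
  intro N M first second _ _
  unfold Spec_solve
  exact solve_eq N M first second
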